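-- pv_equiv track=rewrite | github.com/saxenabhishek/nbox | nbox/framework/on_functions.py | get_code_portion
-- ===== SOURCE A (Python) =====
-- def get_code_portion(cl, lineno, col_offset, end_lineno, end_col_offset, **_):
--   sl, so, el, eo = lineno, col_offset, end_lineno, end_col_offset
--   if sl == el:
--     return cl[sl-1][so:eo]
--   code = ""
--   for i in range(sl - 1, el, 1):
--     if i == sl - 1:
--       code += cl[i][so:]
--     elif i == el - 1:
--       code += "\n" + cl[i][:eo]
--     else:
--       code += "\n" + cl[i]
--
--   # convert to base64
--   # import base64
--   # return base64.b64encode(code.encode()).decode()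
--   return code
-- ===== SOURCE B (Python) =====
-- def get_code_portion(cl, lineno, col_offset, end_lineno, end_col_offset, **_):
--     if lineno == end_lineno:
--         return cl[lineno - 1][col_offset:end_col_offset]
--     segment = list(cl[lineno - 1:end_lineno])
--     if not segment:
--         return ""
--     segment[0] = segment[0][col_offset:]
--     segment[-1] = segment[-1][:end_col_offset]
--     return "\n".join(segment)
-- ===== Notes on version B (the rewrite author's own statement) =====
-- stated objective: simpler
-- what changed: Replaces the index-loop with its three-way positional if/elif/else by a single whole-block slice whose two end lines are fixed up in place, joined with '\n'.
-- outside the precondition, e.g. on get_code_portion(['ab', 'cd'], 0, 0, 2, 1): A returns 'cd\nab\nc', B returns 'c'; on get_code_portion(['a', 'b', 'c', 'd', 'e'], 2, 0, -2, 1): A returns '', B returns 'b\nc'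
import Mathlib
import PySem

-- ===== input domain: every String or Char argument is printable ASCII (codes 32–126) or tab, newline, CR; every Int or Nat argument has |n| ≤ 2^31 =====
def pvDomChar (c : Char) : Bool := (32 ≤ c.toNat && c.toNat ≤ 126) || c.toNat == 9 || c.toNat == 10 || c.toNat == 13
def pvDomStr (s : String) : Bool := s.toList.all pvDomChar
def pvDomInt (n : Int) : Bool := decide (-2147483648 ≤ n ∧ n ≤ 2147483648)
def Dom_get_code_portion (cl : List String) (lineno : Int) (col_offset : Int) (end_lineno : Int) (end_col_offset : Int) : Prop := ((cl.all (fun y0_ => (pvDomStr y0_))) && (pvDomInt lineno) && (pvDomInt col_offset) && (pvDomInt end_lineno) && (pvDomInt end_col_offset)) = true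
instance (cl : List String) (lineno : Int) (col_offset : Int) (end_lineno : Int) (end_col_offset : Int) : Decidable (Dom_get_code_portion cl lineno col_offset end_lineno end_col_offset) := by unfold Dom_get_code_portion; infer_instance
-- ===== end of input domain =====

-- B replaces A's index loop (with its three-way positional if/elif/else) by one whole-block
-- slice whose two end lines are adjusted in place, joined with "\n"; objective: simpler.

-- ===== PORT A =====
def get_code_portion (cl : List String) (lineno : Int) (col_offset : Int) (end_lineno : Int) (end_col_offset : Int) : String :=
  if lineno == end_lineno then
    PySem.Str.slice ((PySem.List.pyGet? cl (lineno - 1)).getD "") (some col_offset) (some end_col_offset)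
  else
    (PySem.List.pyRange (lineno - 1) end_lineno 1).foldl
      (fun code i =>
        if i == lineno - 1 then
          code ++ PySem.Str.slice (PySem.List.pyGetD cl i "") (some col_offset) none
        else if i == end_lineno - 1 then
          code ++ ("\n" ++ PySem.Str.slice (PySem.List.pyGetD cl i "") none (some end_col_offset))
        else
          code ++ ("\n" ++ PySem.List.pyGetD cl i "")) ""

-- ===== PORT B =====
def get_code_portion_alt (cl : List String) (lineno : Int) (col_offset : Int) (end_lineno : Int) (end_col_offset : Int) : String :=
  if lineno == end_lineno then
    PySem.Str.slice ((PySem.List.pyGet? cl (lineno - 1)).getD "") (some col_offset) (some end_col_offset)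
  else
    let seg0 := PySem.List.slice cl (some (lineno - 1)) (some end_lineno)
    if seg0.isEmpty then ""
    else
      let seg1 := PySem.List.pySetD seg0 0
        (PySem.Str.slice (PySem.List.pyGetD seg0 0 "") (some col_offset) none)
      let seg2 := PySem.List.pySetD seg1 (-1)
        (PySem.Str.slice (PySem.List.pyGetD seg1 (-1) "") none (some end_col_offset))
      PySem.Str.join "\n" seg2

-- ===== PRECONDITION & SPEC =====
-- Pre_ admits single-line spans with an in-range (possibly negative, Python-style) index,
-- multi-line spans properly inside the list, and inverted spans whose slice is empty (where both
-- programs return ""). It excludes: spans whose forward loop would index past the list, where A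
-- raises IndexError; and the remaining corners where A's value is an artefact of Python's
-- negative-index wraparound (a multi-line span with nonpositive start, or an inverted span whose
-- mixed-sign bounds make the slice nonempty), on which B's slice semantics differ.
def Pre_get_code_portion (cl : List String) (lineno : Int) (col_offset : Int) (end_lineno : Int) (end_col_offset : Int) : Prop :=
  if lineno = end_lineno then PySem.Raise.InRange cl.length (lineno - 1)
  else if end_lineno < lineno then
    (0 ≤ lineno - 1 ∧ 0 ≤ end_lineno) ∨ (lineno - 1 < 0 ∧ end_lineno < 0) ∨
      (0 ≤ lineno - 1 ∧ end_lineno < 0 ∧ (cl.length : Int) + end_lineno ≤ lineno - 1)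
  else 1 ≤ lineno ∧ lineno < end_lineno ∧ end_lineno ≤ (cl.length : Int)
instance (cl : List String) (lineno : Int) (col_offset : Int) (end_lineno : Int) (end_col_offset : Int) : Decidable (Pre_get_code_portion cl lineno col_offset end_lineno end_col_offset) := by unfold Pre_get_code_portion; infer_instance

def pvWitness_get_code_portion : List String × Int × Int × Int × Int := (["ab", "cd"], 1, 0, 2, 1)

def Spec_get_code_portion (cl : List String) (lineno : Int) (col_offset : Int) (end_lineno : Int) (end_col_offset : Int) (out : String) : Prop := out = get_code_portion_alt cl lineno col_offset end_lineno end_col_offset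
instance (cl : List String) (lineno : Int) (col_offset : Int) (end_lineno : Int) (end_col_offset : Int) (out : String) : Decidable (Spec_get_code_portion cl lineno col_offset end_lineno end_col_offset out) := by unfold Spec_get_code_portion; infer_instance

-- ===== CLAIM (what is proved, stated in full; the proofs are below) =====
def Claim_equal_get_code_portion : Prop := ∀ (cl : List String) (lineno : Int) (col_offset : Int) (end_lineno : Int) (end_col_offset : Int), Dom_get_code_portion cl lineno col_offset end_lineno end_col_offset → Pre_get_code_portion cl lineno col_offset end_lineno end_col_offset → Spec_get_code_portion cl lineno col_offset end_lineno end_col_offset (get_code_portion cl lineno col_offset end_lineno end_col_offset)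

-- ===== LEMMAS AND PROOFS =====

/-- "\n" ++ x for each element, concatenated (shape of A's loop after its first iteration). -/
def nlcat : List String → String
  | [] => ""
  | x :: xs => "\n" ++ x ++ nlcat xs

theorem join_eq_nlcat (x : String) (xs : List String) :
    PySem.Str.join "\n" (x :: xs) = x ++ nlcat xs := by
  induction xs generalizing x with
  | nil => rw [← String.toList_inj]; simp [PySem.Str.toList_join, PySem.Chars.join_singleton, nlcat]
  | cons y ys ih =>
      have ihy := ih y
      rw [← String.toList_inj] at ihy ⊢
      simp only [PySem.Str.toList_join, List.map_cons] at ihy ⊢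
      rw [PySem.Chars.join_cons_cons, ihy]
      simp [nlcat]

theorem set_last {α : Type} (l : List α) (y w : α) :
    (l ++ [y]).set l.length w = l ++ [w] := by
  induction l with
  | nil => simp
  | cons a t ih => simp [ih]

theorem pySetD_zero_cons {α : Type} (x : α) (t : List α) (v : α) :
    PySem.List.pySetD (x :: t) 0 v = v :: t := by
  simp [PySem.List.pySetD, PySem.List.pySet?, PySem.List.pyIdx?]

theorem pySetD_last {α : Type} (l : List α) (y w : α) :
    PySem.List.pySetD (l ++ [y]) (-1) w = l ++ [w] := by
  have hidx : PySem.List.pyIdx? (l ++ [y]).length (-1) = some l.length := by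
    simp [PySem.List.pyIdx?]
  simp only [PySem.List.pySetD, PySem.List.pySet?, hidx, Option.map_some, Option.getD_some]
  exact set_last l y w

/-- A's loop over the indices after the first one. -/
theorem loopA (cl : List String) (sl el co eo : Int) (b : Nat) (helb : el = (b : Int))
    (hb : b ≤ cl.length) :
    ∀ (k j : Nat) (c : String), j + k = b → sl - 1 < (j : Int) → 0 < k →
    (PySem.List.pyRange (j : Int) (b : Int) 1).foldl
      (fun code i =>
        if i == sl - 1 then
          code ++ PySem.Str.slice (PySem.List.pyGetD cl i "") (some co) none
        else if i == el - 1 then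
          code ++ ("\n" ++ PySem.Str.slice (PySem.List.pyGetD cl i "") none (some eo))
        else
          code ++ ("\n" ++ PySem.List.pyGetD cl i "")) c
    = c ++ nlcat ((cl.drop j).take (b - 1 - j)
        ++ [PySem.Str.slice ((cl.drop (b-1)).headI) none (some eo)]) := by
  intro k
  induction k with
  | zero => intro j c hjk hlt h0; exact absurd h0 (by simp)
  | succ k ih =>
    intro j c hjk hlt _
    have hjb : (j : Int) < (b : Int) := by omega
    have hjlen : j < cl.length := by omega
    rw [PySem.List.pyRange_one_cons hjb]
    simp only [List.foldl_cons]
    have hgd : PySem.List.pyGetD cl (j : Int) "" = cl[j] := by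
      rw [PySem.List.pyGetD_natCast]
      exact List.getD_eq_getElem cl "" hjlen
    have hne1 : ((j : Int) == sl - 1) = false := by simp; omega
    by_cases hk : k = 0
    · -- last iteration: j = b - 1
      subst hk
      have hlast : ((j : Int) == el - 1) = true := by simp [helb]; omega
      simp only [hne1, hlast, if_false, if_true, Bool.false_eq_true]
      rw [PySem.List.pyRange_one_eq_nil (by omega)]
      simp only [List.foldl_nil]
      rw [hgd]
      have hb1 : b - 1 = j := by omega
      have htake : b - 1 - j = 0 := by omega
      have hheadI : (List.drop (b-1) cl).headI = cl[j] := by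
        rw [hb1, List.drop_eq_getElem_cons hjlen]
        rfl
      rw [htake, hheadI]
      simp [nlcat]
    · -- middle iteration
      have hmid : ((j : Int) == el - 1) = false := by simp [helb]; omega
      simp only [hne1, hmid, if_false, Bool.false_eq_true]
      have hstep := ih (j+1) (c ++ ("\n" ++ PySem.List.pyGetD cl (j : Int) ""))
        (by omega) (by push_cast; omega) (by omega)
      push_cast at hstep
      rw [hstep, hgd]
      have hsplit : (cl.drop j).take (b - 1 - j)
          = cl[j] :: (cl.drop (j+1)).take (b - 1 - (j+1)) := by
        rw [List.drop_eq_getElem_cons hjlen, show b - 1 - j = (b - 1 - (j+1)) + 1 by omega,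
          List.take_succ_cons]
      rw [hsplit]
      simp [nlcat, String.append_assoc]

/-- An inverted span admitted by Pre_ slices to the empty list. -/
theorem slice_inverted_empty (cl : List String) (sl el : Int) (hinv : el < sl)
    (hc : (0 ≤ sl - 1 ∧ 0 ≤ el) ∨ (sl - 1 < 0 ∧ el < 0) ∨
      (0 ≤ sl - 1 ∧ el < 0 ∧ (cl.length : Int) + el ≤ sl - 1)) :
    PySem.List.slice cl (some (sl - 1)) (some el) = [] := by
  apply List.eq_nil_of_length_eq_zero
  rw [PySem.List.length_slice]
  rcases hc with ⟨h1, h2⟩ | ⟨h1, h2⟩ | ⟨h1, h2, h3⟩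
  · rw [show sl - 1 = (((sl - 1).toNat : Nat) : Int) by omega,
      show el = ((el.toNat : Nat) : Int) by omega,
      PySem.List.clampIdx_natCast, PySem.List.clampIdx_natCast]
    omega
  · rw [show sl - 1 = -((((1 - sl).toNat : Nat) : Int)) by omega,
      show el = -((((-el).toNat : Nat) : Int)) by omega,
      PySem.List.clampIdx_neg_natCast _ _ (by omega),
      PySem.List.clampIdx_neg_natCast _ _ (by omega)]
    omega
  · rw [show sl - 1 = (((sl - 1).toNat : Nat) : Int) by omega,
      show el = -((((-el).toNat : Nat) : Int)) by omega,
      PySem.List.clampIdx_natCast, PySem.List.clampIdx_neg_natCast _ _ (by omega)]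
    omega

-- ===== VERDICT (by name: the statement is the Claim_ definition above) =====
theorem get_code_portion_spec : Claim_equal_get_code_portion := by
  intro cl lineno col_offset end_lineno end_col_offset _hd hpre
  unfold Spec_get_code_portion
  by_cases h : lineno = end_lineno
  · simp [get_code_portion, get_code_portion_alt, h]
  · unfold Pre_get_code_portion at hpre
    rw [if_neg h] at hpre
    have hbe : (lineno == end_lineno) = false := by simp [h]
    by_cases hinv : end_lineno < lineno
    · -- inverted span: A's loop range and B's slice are both empty
      rw [if_pos hinv] at hpre
      rw [get_code_portion, get_code_portion_alt]
      simp only [hbe, Bool.false_eq_true, if_false]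
      rw [PySem.List.pyRange_one_eq_nil (by omega),
        slice_inverted_empty cl lineno end_lineno hinv hpre]
      simp
    · rw [if_neg hinv] at hpre
      obtain ⟨h1, h2, h3⟩ := hpre
      set a : Nat := (lineno - 1).toNat with hadef
      set b : Nat := end_lineno.toNat with hbdef
      have ha' : lineno - 1 = (a : Int) := by omega
      have hb' : end_lineno = (b : Int) := by omega
      have hab : a + 2 ≤ b := by omega
      have hblen : b ≤ cl.length := by omega
      have halen : a < cl.length := by omega
      have hb1len : b - 1 < cl.length := by omega
      -- the two end-adjusted strings
      have hgda : PySem.List.pyGetD cl ((a : Nat) : Int) "" = cl[a] :=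
        by rw [PySem.List.pyGetD_natCast]; exact List.getD_eq_getElem cl "" halen
      -- ===== A side =====
      rw [get_code_portion]
      simp only [hbe, Bool.false_eq_true, if_false]
      rw [ha', hb']
      rw [PySem.List.pyRange_one_cons (by omega)]
      simp only [List.foldl_cons]
      rw [if_pos (beq_self_eq_true ((a : Nat) : Int))]
      have hstep := loopA cl lineno end_lineno col_offset end_col_offset b hb' hblen
        (b - (a+1)) (a+1)
        ("" ++ PySem.Str.slice (PySem.List.pyGetD cl ((a : Nat) : Int) "") (some col_offset) none)
        (by omega) (by push_cast; omega) (by omega)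
      rw [ha', hb'] at hstep
      push_cast at hstep ⊢
      rw [hstep, hgda]
      -- ===== B side =====
      rw [get_code_portion_alt]
      have hbe2 : (lineno == ((b : Nat) : Int)) = false := by simp; omega
      simp only [hbe2, Bool.false_eq_true, if_false]
      rw [ha']
      rw [PySem.List.slice_natCast]
      have hseg0 : (cl.drop a).take (b - a) = cl[a] :: (cl.drop (a+1)).take (b - a - 1) := by
        rw [List.drop_eq_getElem_cons halen, show b - a = (b - a - 1) + 1 by omega,
          List.take_succ_cons]
        simp
      rw [hseg0]
      simp only [List.isEmpty_cons, Bool.false_eq_true, if_false]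
      simp only [PySem.List.pyGetD_zero_cons]
      rw [pySetD_zero_cons]
      have hmid : (cl.drop (a+1)).take (b - a - 1)
          = (cl.drop (a+1)).take (b - a - 2) ++ [cl[b-1]] := by
        rw [show b - a - 1 = (b - a - 2) + 1 by omega, List.take_add_one]
        congr 1
        have h9 : (cl.drop (a+1))[b - a - 2]? = some cl[b-1] := by
          rw [List.getElem?_drop, show a + 1 + (b - a - 2) = b - 1 by omega]
          exact List.getElem?_eq_getElem hb1len
        rw [h9]
        rfl
      rw [hmid, ← List.cons_append]
      rw [PySem.List.pyGetD_neg_one_append_singleton]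
      rw [pySetD_last]
      rw [List.cons_append]
      rw [join_eq_nlcat]
      -- ===== both sides are now head ++ nlcat tail =====
      have hhead2 : (List.drop (b-1) cl).headI = cl[b-1] := by
        rw [List.drop_eq_getElem_cons hb1len]
        rfl
      rw [hhead2, show b - 1 - (a+1) = b - a - 2 from by omega]
      simp
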